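-- pv_equiv track=rewrite | github.com/rich-zhang65/Aiso | calculations.py | findMins
-- ===== SOURCE A (Python) =====
-- def findMins(pointsArray):
--
--   minX = pointsArray[0][0]
--   minY = pointsArray[0][1]
--
--   for i in range(len(pointsArray)):
--
--     if(pointsArray[i][0] < minX):
--       minX = pointsArray[i][0]
--
--     if(pointsArray[i][1] < minY):
--       minY = pointsArray[i][1]
--
--   return [minX, minY]
-- ===== SOURCE B (Python) =====
-- def findMins(pointsArray):
--     xs = sorted(p[0] for p in pointsArray)
--     ys = sorted(p[1] for p in pointsArray)
--     return [xs[0], ys[0]]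
-- ===== Notes on version B (the rewrite author's own statement) =====
-- stated objective: alternative
-- what changed: Replaces the fused single-pass loop with running minX/minY state by sorting each projected coordinate list and taking its first element (selection via sorting); Pre_ excludes the empty list, on which both A and B raise IndexError.
import Mathlib
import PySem

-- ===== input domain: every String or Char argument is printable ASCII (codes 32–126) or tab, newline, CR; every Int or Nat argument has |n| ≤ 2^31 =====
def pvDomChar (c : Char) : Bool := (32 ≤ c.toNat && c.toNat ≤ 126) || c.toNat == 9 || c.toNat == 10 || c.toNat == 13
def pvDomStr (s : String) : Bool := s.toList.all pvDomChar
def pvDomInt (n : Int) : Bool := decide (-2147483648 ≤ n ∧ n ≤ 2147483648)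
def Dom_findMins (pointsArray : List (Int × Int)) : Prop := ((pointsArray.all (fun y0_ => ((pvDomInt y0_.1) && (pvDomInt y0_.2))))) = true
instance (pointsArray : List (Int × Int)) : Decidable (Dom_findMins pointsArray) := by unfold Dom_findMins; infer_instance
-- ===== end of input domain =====

-- B finds each coordinate minimum by sorting the projected coordinate list and taking
-- its first element, instead of A's fused loop carrying running minX/minY state
-- (alternative algorithm: selection via sorting; not faster).

-- ===== PORT A =====
-- A: minX/minY initialised from pointsArray[0], one fused loop over all indices
-- updating both running minima; raises IndexError on the empty list.
def findMins (pointsArray : List (Int × Int)) : List Int :=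
  match pointsArray with
  | [] => []   -- A raises IndexError here; excluded by Pre_findMins
  | p :: _ =>
    let st := pointsArray.foldl
      (fun (m : Int × Int) q =>
        (if q.1 < m.1 then q.1 else m.1, if q.2 < m.2 then q.2 else m.2))
      (p.1, p.2)
    [st.1, st.2]

-- ===== PORT B =====
-- B: sort each projected coordinate list, return the first element of each.
def findMins_alt (pointsArray : List (Int × Int)) : List Int :=
  let xs := PySem.List.sorted (pointsArray.map Prod.fst) (fun x => x)
  let ys := PySem.List.sorted (pointsArray.map Prod.snd) (fun x => x)
  match PySem.List.pyGet? xs 0, PySem.List.pyGet? ys 0 with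
  | some a, some b => [a, b]
  | _, _ => []   -- xs[0] raises IndexError here; excluded by Pre_findMins

-- ===== PRECONDITION & SPEC =====
-- Pre_ excludes only the empty list, on which both A and B raise IndexError.
def Pre_findMins (pointsArray : List (Int × Int)) : Prop := pointsArray.isEmpty = false
instance (pointsArray : List (Int × Int)) : Decidable (Pre_findMins pointsArray) := by unfold Pre_findMins; infer_instance
def pvWitness_findMins : (List (Int × Int)) := [(3, -1), (0, 7)]

def Spec_findMins (pointsArray : List (Int × Int)) (out : List Int) : Prop := out = findMins_alt pointsArray
instance (pointsArray : List (Int × Int)) (out : List Int) : Decidable (Spec_findMins pointsArray out) := by unfold Spec_findMins; infer_instance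

-- ===== CLAIM (what is proved, stated in full; the proofs are below) =====
def Claim_equal_findMins : Prop := ∀ (pointsArray : List (Int × Int)), Dom_findMins pointsArray → Pre_findMins pointsArray → Spec_findMins pointsArray (findMins pointsArray)

-- ===== LEMMAS AND PROOFS =====

-- A's "if q < m then q else m" update is `min`.
theorem pv_upd_eq_min (m q : Int) : (if q < m then q else m) = min m q := by
  rcases lt_or_ge q m with h | h
  · simp [h, min_eq_right (le_of_lt h)]
  · simp [not_lt.mpr h, min_eq_left h]

-- A's fold over pairs projects to a min-fold on each coordinate.
theorem pv_fold_proj (l : List (Int × Int)) (a b : Int) :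
    l.foldl (fun (m : Int × Int) q =>
        (if q.1 < m.1 then q.1 else m.1, if q.2 < m.2 then q.2 else m.2)) (a, b)
      = ((l.map Prod.fst).foldl min a, (l.map Prod.snd).foldl min b) := by
  induction l generalizing a b with
  | nil => rfl
  | cons p t ih => rw [List.foldl_cons, ih]; simp [pv_upd_eq_min]

-- The head of the identity-sorted nonempty list is the running-min fold.
theorem pv_head_sorted (x : Int) (t : List Int) :
    PySem.List.pyGet? (PySem.List.sorted (x :: t) (fun y => y)) 0
      = some (t.foldl min x) := by
  have hne : PySem.List.sorted (x :: t) (fun y : Int => y) ≠ [] := by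
    simp [PySem.List.sorted_eq_nil_iff]
  obtain ⟨m, t', hs⟩ := List.exists_cons_of_ne_nil hne
  have hmem : m ∈ (x :: t) := by
    have : m ∈ PySem.List.sorted (x :: t) (fun y : Int => y) := by simp [hs]
    exact (PySem.List.mem_sorted _ _ _ _).1 this
  have hmin := PySem.List.min?_isMin (xs := x :: t) (key := fun y : Int => y)
    (m := t.foldl min x) (by simp [PySem.List.min?_id_cons])
  have hfmem : t.foldl min x ∈ (x :: t) := by
    have := PySem.List.min?_mem (xs := x :: t) (key := fun y : Int => y)
      (m := t.foldl min x) (by simp [PySem.List.min?_id_cons])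
    exact this
  have hle : m ≤ t.foldl min x := PySem.List.key_head_sorted_le _ _ hs _ hfmem
  have hge : t.foldl min x ≤ m := hmin m hmem
  have : m = t.foldl min x := le_antisymm hle hge
  simp [hs, this, PySem.List.pyGet?, PySem.List.pyIdx?]

-- ===== VERDICT (by name: the statement is the Claim_ definition above) =====
theorem findMins_spec : Claim_equal_findMins := by
  intro pointsArray _ hpre
  unfold Spec_findMins
  match pointsArray with
  | [] => simp [Pre_findMins] at hpre
  | p :: t =>
    simp only [findMins, findMins_alt, pv_fold_proj, List.map_cons, pv_head_sorted,
      List.foldl_cons, ite_self]
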